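-- pv_equiv track=rewrite | github.com/JKR8/querytorque_v8 | packages/qt-sql/qt_sql/renderers/sql_report.py | _estimate_improvement
-- ===== SOURCE A (Python) =====
-- def _estimate_improvement(issues: list) -> str:
--     """Estimate potential improvement from fixing issues."""
--     critical = sum(1 for i in issues if i["severity"] == "critical")
--     high = sum(1 for i in issues if i["severity"] == "high")
--
--     if critical > 0:
--         return "50-80% potential"
--     elif high > 0:
--         return "20-50% potential"
--     elif issues:
--         return "5-20% potential"
--     return "Already optimized"
-- ===== SOURCE B (Python) =====
-- _LABELS = ("Already optimized", "5-20% potential", "20-50% potential", "50-80% potential")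
--
-- def _rank(sev):
--     return 3 if sev == "critical" else 2 if sev == "high" else 1
--
-- def _estimate_improvement(issues: list) -> str:
--     """Estimate potential improvement from fixing issues."""
--     rank = 0
--     for i in issues:
--         r = _rank(i["severity"])
--         if r > rank:
--             rank = r
--     return _LABELS[rank]
-- ===== Notes on version B (the rewrite author's own statement) =====
-- stated objective: alternative
-- what changed: Replaces the two counting scans plus a return-chain with a single pass maintaining the maximum numeric severity rank (critical=3, high=2, other=1, none=0) and a final table lookup of the label by rank.
import Mathlib
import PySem

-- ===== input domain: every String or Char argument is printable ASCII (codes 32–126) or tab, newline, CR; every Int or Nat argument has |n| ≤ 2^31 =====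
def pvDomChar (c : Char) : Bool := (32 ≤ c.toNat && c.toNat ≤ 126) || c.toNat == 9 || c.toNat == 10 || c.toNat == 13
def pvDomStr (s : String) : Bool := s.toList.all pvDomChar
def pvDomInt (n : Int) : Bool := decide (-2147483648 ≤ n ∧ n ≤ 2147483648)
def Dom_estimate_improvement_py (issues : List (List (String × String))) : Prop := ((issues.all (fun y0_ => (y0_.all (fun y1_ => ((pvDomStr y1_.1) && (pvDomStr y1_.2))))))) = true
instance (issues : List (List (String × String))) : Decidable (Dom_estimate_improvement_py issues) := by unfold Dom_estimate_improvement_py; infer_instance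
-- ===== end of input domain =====

-- B replaces A's two counting scans + branch chain by a single pass keeping the
-- maximum numeric severity rank, then one table lookup; return values proved equal.

-- i["severity"] (dict lookup, KeyError = none)
def pvSevGet (i : List (String × String)) : Option String := (PySem.Dict.mk i).get? "severity"

-- ===== PORT A =====
def estimate_improvement_py (issues : List (List (String × String))) : String :=
  -- critical = sum(1 for i in issues if i["severity"] == "critical")
  let critical : Int := issues.foldl (fun a i => if pvSevGet i = some "critical" then a + 1 else a) 0
  -- high = sum(1 for i in issues if i["severity"] == "high")
  let high : Int := issues.foldl (fun a i => if pvSevGet i = some "high" then a + 1 else a) 0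
  if critical > 0 then "50-80% potential"
  else if high > 0 then "20-50% potential"
  else if issues ≠ [] then "5-20% potential"
  else "Already optimized"

-- ===== PORT B =====
-- _rank(sev); Python raises KeyError on a missing "severity" key (excluded by
-- Pre_); the port takes getD "" there to stay total.
def pvRank (i : List (String × String)) : Nat :=
  let sev := (pvSevGet i).getD ""
  if sev = "critical" then 3 else if sev = "high" then 2 else 1

def pvLabels : List String :=
  ["Already optimized", "5-20% potential", "20-50% potential", "50-80% potential"]

def estimate_improvement_py_alt (issues : List (List (String × String))) : String :=
  let rank : Nat := issues.foldl (fun rank i => let r := pvRank i; if r > rank then r else rank) 0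
  pvLabels.getD rank ""

-- ===== PRECONDITION & SPEC =====
-- Pre_ excludes exactly the inputs where both Pythons raise KeyError: an issue dict without a "severity" key.
def Pre_estimate_improvement_py (issues : List (List (String × String))) : Prop :=
  ∀ i ∈ issues, (pvSevGet i).isSome = true
instance (issues : List (List (String × String))) : Decidable (Pre_estimate_improvement_py issues) := by unfold Pre_estimate_improvement_py; infer_instance
def pvWitness_estimate_improvement_py : (List (List (String × String))) :=
  [[("severity", "high")], [("severity", "low")]]

def Spec_estimate_improvement_py (issues : List (List (String × String))) (out : String) : Prop := out = estimate_improvement_py_alt issues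
instance (issues : List (List (String × String))) (out : String) : Decidable (Spec_estimate_improvement_py issues out) := by unfold Spec_estimate_improvement_py; infer_instance

-- ===== CLAIM (what is proved, stated in full; the proofs are below) =====
def Claim_equal_estimate_improvement_py : Prop := ∀ (issues : List (List (String × String))), Dom_estimate_improvement_py issues → Pre_estimate_improvement_py issues → Spec_estimate_improvement_py issues (estimate_improvement_py issues)

-- ===== LEMMAS AND PROOFS =====

-- the counting fold of A: positive iff some element satisfies p
theorem pv_foldl_count (p : List (String × String) → Prop) [DecidablePred p]
    (l : List (List (String × String))) (n : Int) :
    l.foldl (fun a i => if p i then a + 1 else a) n = n + (l.countP (fun i => decide (p i)) : Int) := by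
  induction l generalizing n with
  | nil => simp
  | cons x xs ih =>
    simp only [List.foldl_cons, List.countP_cons, ih]
    split_ifs <;> simp_all <;> omega

theorem pv_count_pos_iff (p : List (String × String) → Prop) [DecidablePred p]
    (l : List (List (String × String))) :
    ((0:Int) < l.foldl (fun a i => if p i then a + 1 else a) (0:Int)) ↔ ∃ i ∈ l, p i := by
  have hfc := pv_foldl_count p l 0
  rw [hfc]
  have hcp : 0 < l.countP (fun i => decide (p i)) ↔ ∃ i ∈ l, p i := by
    simpa using List.countP_pos (p := fun i => decide (p i)) (l := l)
  constructor
  · intro h; refine hcp.mp ?_; omega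
  · intro h; have := hcp.mpr h; omega

-- B's fold is the running maximum: three structural facts about it
def pvFold (l : List (List (String × String))) (acc : Nat) : Nat :=
  l.foldl (fun rank i => let r := pvRank i; if r > rank then r else rank) acc

theorem pv_le_fold (l : List (List (String × String))) (acc : Nat) : acc ≤ pvFold l acc := by
  induction l generalizing acc with
  | nil => simp [pvFold]
  | cons x xs ih =>
    simp only [pvFold, List.foldl_cons]
    by_cases hx : pvRank x > acc
    · rw [if_pos hx]
      have := ih (pvRank x)
      simp only [pvFold] at this
      omega
    · rw [if_neg hx]
      exact ih acc

theorem pv_fold_ub (l : List (List (String × String))) (acc : Nat) :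
    ∀ i ∈ l, pvRank i ≤ pvFold l acc := by
  induction l generalizing acc with
  | nil => simp
  | cons x xs ih =>
    intro i hi
    simp only [pvFold, List.foldl_cons]
    rcases List.mem_cons.mp hi with h | h
    · subst h
      by_cases hx : pvRank i > acc
      · rw [if_pos hx]
        have := pv_le_fold xs (pvRank i)
        simp only [pvFold] at this
        omega
      · rw [if_neg hx]
        have := pv_le_fold xs acc
        simp only [pvFold] at this
        omega
    · by_cases hx : pvRank x > acc
      · rw [if_pos hx]; exact ih (pvRank x) i h
      · rw [if_neg hx]; exact ih acc i h

theorem pv_fold_mem (l : List (List (String × String))) (acc : Nat) :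
    pvFold l acc = acc ∨ ∃ i ∈ l, pvFold l acc = pvRank i := by
  induction l generalizing acc with
  | nil => left; simp [pvFold]
  | cons x xs ih =>
    simp only [pvFold, List.foldl_cons]
    by_cases hx : pvRank x > acc
    · rw [if_pos hx]
      rcases ih (pvRank x) with h | ⟨i, hi, h⟩
      · right; exact ⟨x, List.mem_cons_self .., h⟩
      · right; exact ⟨i, List.mem_cons_of_mem _ hi, h⟩
    · rw [if_neg hx]
      rcases ih acc with h | ⟨i, hi, h⟩
      · left; exact h
      · right; exact ⟨i, List.mem_cons_of_mem _ hi, h⟩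

-- ===== VERDICT (by name: the statement is the Claim_ definition above) =====
theorem estimate_improvement_py_spec : Claim_equal_estimate_improvement_py := by
  intro issues _ hpre
  unfold Spec_estimate_improvement_py estimate_improvement_py estimate_improvement_py_alt
  simp only
  have hc := pv_count_pos_iff (fun i => pvSevGet i = some "critical") issues
  have hh := pv_count_pos_iff (fun i => pvSevGet i = some "high") issues
  have hrank : ∀ i ∈ issues,
      (pvRank i = 3 ↔ pvSevGet i = some "critical") ∧
      (pvRank i = 2 ↔ pvSevGet i = some "high") ∧ 1 ≤ pvRank i ∧ pvRank i ≤ 3 := by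
    intro i hi
    have := hpre i hi
    cases h : pvSevGet i with
    | none => rw [h] at this; simp at this
    | some s =>
      simp only [pvRank, h, Option.getD_some]
      refine ⟨?_, ?_, ?_, ?_⟩ <;> split_ifs <;> simp_all
  have hmem := pv_fold_mem issues 0
  have hub := pv_fold_ub issues 0
  show (if _ then _ else _) = pvLabels.getD (pvFold issues 0) ""
  by_cases hcrit : ∃ i ∈ issues, pvSevGet i = some "critical"
  · obtain ⟨i, hi, hs⟩ := hcrit
    have h3 : pvRank i = 3 := ((hrank i hi).1).mpr hs
    have hlo : 3 ≤ pvFold issues 0 := h3 ▸ hub i hi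
    have hhi : pvFold issues 0 ≤ 3 := by
      rcases hmem with h | ⟨j, hj, h⟩
      · omega
      · have := (hrank j hj).2.2.2; omega
    have : pvFold issues 0 = 3 := le_antisymm hhi hlo
    rw [this]
    rw [if_pos (gt_iff_lt.mpr (hc.mpr ⟨i, hi, hs⟩))]
    rfl
  · rw [if_neg (by rw [gt_iff_lt, hc]; exact hcrit)]
    have hle2 : pvFold issues 0 ≤ 2 := by
      rcases hmem with h | ⟨j, hj, h⟩
      · omega
      · have hb := (hrank j hj).2.2.2
        have h3 := (hrank j hj).1
        have : pvRank j ≠ 3 := fun he => hcrit ⟨j, hj, h3.mp he⟩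
        omega
    by_cases hhigh : ∃ i ∈ issues, pvSevGet i = some "high"
    · obtain ⟨i, hi, hs⟩ := hhigh
      have h2 : pvRank i = 2 := ((hrank i hi).2.1).mpr hs
      have hlo : 2 ≤ pvFold issues 0 := h2 ▸ hub i hi
      have : pvFold issues 0 = 2 := le_antisymm hle2 hlo
      rw [this, if_pos (gt_iff_lt.mpr (hh.mpr ⟨i, hi, hs⟩))]
      rfl
    · rw [if_neg (by rw [gt_iff_lt, hh]; exact hhigh)]
      cases issues with
      | nil => simp [pvFold, pvLabels]
      | cons x xs =>
        rw [if_pos (by simp)]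
        have hx := hrank x (List.mem_cons_self ..)
        have hle1 : pvFold (x :: xs) 0 ≤ 1 := by
          rcases hmem with h | ⟨j, hj, h⟩
          · omega
          · have hb := (hrank j hj).2.2
            have : pvRank j ≠ 3 := fun he => hcrit ⟨j, hj, ((hrank j hj).1).mp he⟩
            have : pvRank j ≠ 2 := fun he => hhigh ⟨j, hj, ((hrank j hj).2.1).mp he⟩
            omega
        have hlo : 1 ≤ pvFold (x :: xs) 0 := le_trans hx.2.2.1 (hub x (List.mem_cons_self ..))
        have : pvFold (x :: xs) 0 = 1 := le_antisymm hle1 hlo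
        rw [this]
        rfl
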